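-- pv_equiv track=rewrite | github.com/tdanniels/tadm | python/src/4-31.py | find_k
-- ===== SOURCE A (Python) =====
-- def find_k(l, begin, end):
--     i = 1
--     if begin + i > end:
--         return 0
--     while True:
--         if l[begin] > l[begin + i]:
--             if i == 1:
--                 return begin + i
--             else:
--                 return find_k(l, begin + i // 2, begin + i)
--         else:
--             if i == end - begin:
--                 return 0
--             i = min(i * 2, end - begin)
-- ===== SOURCE B (Python) =====
-- def find_k(l, begin, end):
--     # Iterative interval loop; the gallop is a single first-match scan over
--     # exponents j, probing min(2**j, L), instead of mutable doubling + recursion.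
--     b, e = begin, end
--     while b + 1 <= e:
--         L = e - b
--         ref = l[b]
--         hit = next((min(1 << j, L) for j in range(L.bit_length() + 1)
--                     if ref > l[b + min(1 << j, L)]), None)
--         if hit is None:
--             return 0
--         if hit == 1:
--             return b + 1
--         b, e = b + hit // 2, b + hit
--     return 0
-- ===== Notes on version B (the rewrite author's own statement) =====
-- stated objective: alternative
-- what changed: A restarts a mutable doubling gallop (i = min(i*2, end-begin)) and recurses into the narrowed interval; B is an iterative loop over the interval whose gallop step is computed in one shot as the first exponent j <= L.bit_length() whose probe min(2**j, L) drops below the reference, with no recursion and no mutable doubling.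
-- outside the precondition, e.g. on find_k([2, 1], -2, 1): A returns -1, B returns -1
import Mathlib
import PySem

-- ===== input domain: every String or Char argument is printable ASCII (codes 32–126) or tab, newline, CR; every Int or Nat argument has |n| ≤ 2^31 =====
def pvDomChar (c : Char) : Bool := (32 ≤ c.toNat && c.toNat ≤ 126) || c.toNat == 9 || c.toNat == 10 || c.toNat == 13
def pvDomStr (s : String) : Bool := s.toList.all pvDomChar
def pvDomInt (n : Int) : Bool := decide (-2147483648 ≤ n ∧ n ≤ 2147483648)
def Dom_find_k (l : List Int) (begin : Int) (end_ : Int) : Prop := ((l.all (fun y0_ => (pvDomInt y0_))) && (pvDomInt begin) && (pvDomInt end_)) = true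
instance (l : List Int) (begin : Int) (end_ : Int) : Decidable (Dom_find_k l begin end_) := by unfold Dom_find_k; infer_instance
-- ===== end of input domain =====

-- B replaces A's recursive restart-the-gallop structure by an iterative interval loop whose
-- gallop step is a single first-match scan over exponents j (probe min(2^j, L), j ≤ L.bit_length());
-- same results, similar cost (objective: alternative).

-- ===== PORT A =====
-- find_kFuel is the `while True:` body; the recursive call inlines find_k's entry guard.
-- The Nat argument is a pure totality guard (fuel): the `0 => 0` branch is unreachable
-- for the fuel find_k supplies (inner_eq below is proved under the fuel bound).
def find_kFuel (l : List Int) (b : Int) (e : Int) (i : Int) : Nat → Int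
  | 0 => 0
  | fuel + 1 =>
    if PySem.List.pyGetD l b 0 > PySem.List.pyGetD l (b + i) 0 then
      if i = 1 then b + i
      else
        if b + PySem.Int.floordiv i 2 + 1 > b + i then 0
        else find_kFuel l (b + PySem.Int.floordiv i 2) (b + i) 1 fuel
    else
      if i = e - b then 0
      else find_kFuel l b e (min (i * 2) (e - b)) fuel

def find_k (l : List Int) (begin : Int) (end_ : Int) : Int :=
  if begin + 1 > end_ then 0
  else find_kFuel l begin end_ 1
    (((end_ - begin).toNat + 1) * ((end_ - begin).toNat + 1))

-- ===== PORT B =====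
-- the `next((min(1 << j, L) for j in range(L.bit_length() + 1) if ref > l[b + min(1 << j, L)]), None)`
def gallop (l : List Int) (b : Int) (L : Int) (ref : Int) : Option Int :=
  (List.range (PySem.Int.bitLength L + 1)).findSome? (fun j =>
    if ref > PySem.List.pyGetD l (b + min ((2:Int) ^ j) L) 0
    then some (min ((2:Int) ^ j) L) else none)

-- the `while b + 1 <= e:` loop over the interval; the Nat argument is again a pure
-- fuel guard, unreachable for the fuel find_k_alt supplies (the interval shrinks
-- strictly each iteration).
def altFuel (l : List Int) (b : Int) (e : Int) : Nat → Int
  | 0 => 0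
  | fuel + 1 =>
    if b + 1 ≤ e then
      match gallop l b (e - b) (PySem.List.pyGetD l b 0) with
      | none => 0
      | some hit =>
        if hit = 1 then b + 1
        else altFuel l (b + PySem.Int.floordiv hit 2) (b + hit) fuel
    else 0

def find_k_alt (l : List Int) (begin : Int) (end_ : Int) : Int :=
  altFuel l begin end_ ((end_ - begin).toNat + 1)

-- ===== PRECONDITION & SPEC =====
-- Pre_ excludes inputs on which A's probing raises IndexError or (for negative `begin`)
-- lands on negative-index wraparound; it keeps the immediate-return case end < begin + 1
-- and the standard in-range domain 0 ≤ begin, end < len(l), where A never raises.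
def Pre_find_k (l : List Int) (begin : Int) (end_ : Int) : Prop :=
  end_ < begin + 1 ∨ (0 ≤ begin ∧ end_ < (l.length : Int))
instance (l : List Int) (begin : Int) (end_ : Int) : Decidable (Pre_find_k l begin end_) := by
  unfold Pre_find_k; infer_instance

def pvWitness_find_k : List Int × Int × Int := ([3, 4, 5, 1, 2], 0, 4)

def Spec_find_k (l : List Int) (begin : Int) (end_ : Int) (out : Int) : Prop := out = find_k_alt l begin end_
instance (l : List Int) (begin : Int) (end_ : Int) (out : Int) : Decidable (Spec_find_k l begin end_ out) := by unfold Spec_find_k; infer_instance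

-- ===== CLAIM (what is proved, stated in full; the proofs are below) =====
def Claim_equal_find_k : Prop := ∀ (l : List Int) (begin : Int) (end_ : Int), Dom_find_k l begin end_ → Pre_find_k l begin end_ → Spec_find_k l begin end_ (find_k l begin end_)

-- ===== LEMMAS AND PROOFS =====

-- a gallop hit is a probe value: between 1 and L
lemma gallop_le {l : List Int} {b L ref i : Int} (hL : 1 ≤ L)
    (h : gallop l b L ref = some i) : 1 ≤ i ∧ i ≤ L := by
  obtain ⟨j, _, hf⟩ := List.exists_of_findSome?_eq_some h
  have hp : (1:Int) ≤ 2 ^ j := one_le_pow₀ (by decide)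
  by_cases hc : ref > PySem.List.pyGetD l (b + min ((2:Int) ^ j) L) 0
  · rw [if_pos hc] at hf
    have hm : min ((2:Int) ^ j) L = i := by injection hf
    exact hm ▸ ⟨le_min hp hL, min_le_right _ _⟩
  · rw [if_neg hc] at hf; exact absurd hf (by simp)

-- if probes at all exponents j' < j miss and the probe at j hits, gallop returns that probe
lemma gallop_first_hit (l : List Int) (b L ref : Int) (j : Nat)
    (hj : j ≤ PySem.Int.bitLength L)
    (hmiss : ∀ j' : Nat, j' < j → ¬ (ref > PySem.List.pyGetD l (b + min ((2:Int) ^ j') L) 0))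
    (hhit : ref > PySem.List.pyGetD l (b + min ((2:Int) ^ j) L) 0) :
    gallop l b L ref = some (min ((2:Int) ^ j) L) := by
  unfold gallop
  have hsplit : PySem.Int.bitLength L + 1 = j + (PySem.Int.bitLength L - j + 1) := by omega
  rw [hsplit, List.range_add, List.findSome?_append]
  have h1 : (List.range j).findSome? (fun j' =>
      if ref > PySem.List.pyGetD l (b + min ((2:Int) ^ j') L) 0
      then some (min ((2:Int) ^ j') L) else none) = none := by
    refine List.findSome?_eq_none_iff.mpr (fun a ha => ?_)
    exact if_neg (hmiss a (List.mem_range.mp ha))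
  rw [h1, List.range_succ_eq_map]
  simp only [List.map_cons, List.findSome?_cons, Nat.add_zero, if_pos hhit]
  rfl

-- if probes at all exponents miss, gallop returns none
lemma gallop_all_miss (l : List Int) (b L ref : Int)
    (hall : ∀ j : Nat, ¬ (ref > PySem.List.pyGetD l (b + min ((2:Int) ^ j) L) 0)) :
    gallop l b L ref = none := by
  unfold gallop
  exact List.findSome?_eq_none_iff.mpr (fun a _ => if_neg (hall a))

-- strictly monotone powers: a probe value 2^j below L keeps j below L.bit_length()
lemma exp_lt_bitLength {L : Int} (hL : 1 ≤ L) {j : Nat} (h : (2:Int) ^ j < L) :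
    j < PySem.Int.bitLength L := by
  have h2 : L.natAbs < 2 ^ PySem.Int.bitLength L := PySem.Int.lt_two_pow_bitLength L
  have hcast : ((2 ^ j : Nat) : Int) = (2:Int) ^ j := by push_cast; ring
  have hj : (2 ^ j : Nat) < L.natAbs := by omega
  have : (2 ^ j : Nat) < 2 ^ PySem.Int.bitLength L := lt_trans hj h2
  exact (Nat.pow_lt_pow_iff_right (by norm_num)).mp this

-- squares: a' + 1 ≤ a  →  a'² + a' + 1 ≤ a²   (fuel accounting for the interval jump)
lemma sq_jump {a' a : Nat} (h : a' + 1 ≤ a) : a' * a' + a' + 1 ≤ a * a := by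
  calc a' * a' + a' + 1 ≤ (a' + 1) * (a' + 1) := by ring_nf; omega
    _ ≤ a * a := Nat.mul_le_mul h h

-- A's inner gallop, started at probe i = min(2^j, e-b) with all earlier probes missed
-- and enough fuel, computes exactly what B computes from gallop's first hit.
lemma inner_eq (l : List Int) :
    ∀ (n : Nat), ∀ (fuel : Nat) (b e i : Int) (j : Nat),
    1 ≤ i → i ≤ e - b →
    (e - b).toNat ≤ n →
    (e - b).toNat * (e - b).toNat + (e - b - i).toNat < fuel →
    j ≤ PySem.Int.bitLength (e - b) →
    i = min ((2:Int) ^ j) (e - b) →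
    (∀ j' : Nat, j' < j →
      ¬ (PySem.List.pyGetD l b 0 > PySem.List.pyGetD l (b + min ((2:Int) ^ j') (e - b)) 0)) →
    find_kFuel l b e i fuel =
      match gallop l b (e - b) (PySem.List.pyGetD l b 0) with
      | none => 0
      | some hit => if hit = 1 then b + 1
                    else find_k l (b + PySem.Int.floordiv hit 2) (b + hit) := by
  intro n
  induction n using Nat.strong_induction_on with
  | _ n ihn =>
  intro fuel
  induction fuel with
  | zero => intro b e i j h1 h2 hn hfuel; exact absurd hfuel (Nat.not_lt_zero _)
  | succ fuel ihf =>
  intro b e i j h1 h2 hn hfuel hj hi hmiss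
  rw [find_kFuel]
  by_cases hhit : PySem.List.pyGetD l b 0 > PySem.List.pyGetD l (b + i) 0
  · rw [if_pos hhit]
    rw [gallop_first_hit l b (e - b) (PySem.List.pyGetD l b 0) j hj hmiss (by rw [← hi]; exact hhit)]
    rw [← hi]
    show _ = if i = 1 then b + 1 else find_k l (b + PySem.Int.floordiv i 2) (b + i)
    by_cases hone : i = 1
    · rw [if_pos hone, if_pos hone, hone]
    · rw [if_neg hone, if_neg hone]
      unfold find_k
      have hd : PySem.Int.floordiv i 2 = i / 2 := PySem.Int.floordiv_eq_ediv_of_pos (by decide)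
      by_cases hg2 : b + PySem.Int.floordiv i 2 + 1 > b + i
      · rw [if_pos hg2, if_pos hg2]
      · rw [if_neg hg2, if_neg hg2]
        -- both runs of the new interval [b + i//2, b + i) agree with the gallop form
        have hL' : ((b + i) - (b + PySem.Int.floordiv i 2)).toNat + 1 ≤ (e - b).toNat := by
          rw [hd] at *; omega
        have hm : ((b + i) - (b + PySem.Int.floordiv i 2)).toNat < n := by omega
        have hsq := sq_jump hL'
        have hone' : (1:Int) ≤ (b + i) - (b + PySem.Int.floordiv i 2) := by rw [hd] at *; omega
        have happ := fun (f : Nat) (hf : ((b + i) - (b + PySem.Int.floordiv i 2)).toNat *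
              ((b + i) - (b + PySem.Int.floordiv i 2)).toNat +
              ((b + i) - (b + PySem.Int.floordiv i 2) - 1).toNat < f) =>
          ihn ((b + i) - (b + PySem.Int.floordiv i 2)).toNat hm f
            (b + PySem.Int.floordiv i 2) (b + i) 1 0 (le_refl 1) hone' (le_refl _) hf
            (Nat.zero_le _) (by rw [pow_zero]; omega)
            (fun j' hj' => absurd hj' (Nat.not_lt_zero j'))
        rw [happ fuel (by omega), happ ((((b + i) - (b + PySem.Int.floordiv i 2)).toNat + 1) *
            (((b + i) - (b + PySem.Int.floordiv i 2)).toNat + 1)) (by ring_nf; omega)]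
  · rw [if_neg hhit]
    by_cases hend : i = e - b
    · rw [if_pos hend]
      rw [gallop_all_miss l b (e - b) (PySem.List.pyGetD l b 0) ?_]
      intro j''
      by_cases hlt : j'' < j
      · exact hmiss j'' hlt
      · have hge : (2:Int) ^ j ≤ 2 ^ j'' := pow_le_pow_right₀ (by norm_num) (by omega)
        have hcap : (e - b) ≤ (2:Int) ^ j := by
          by_contra hc
          push Not at hc
          have h5 := min_eq_left (le_of_lt hc)
          omega
        rw [min_eq_right (by omega), show b + (e - b) = b + i by omega]
        exact hhit
    · rw [if_neg hend]
      have hlt : (2:Int) ^ j < e - b := by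
        by_contra hc
        push Not at hc
        have : min ((2:Int) ^ j) (e - b) = e - b := min_eq_right hc
        omega
      have hij : i = (2:Int) ^ j := by
        have : min ((2:Int) ^ j) (e - b) = (2:Int) ^ j := min_eq_left (by omega)
        omega
      have hstep : min (i * 2) (e - b) = min ((2:Int) ^ (j + 1)) (e - b) := by
        rw [hij, pow_succ]
      have hj1 : j + 1 ≤ PySem.Int.bitLength (e - b) :=
        exp_lt_bitLength (by omega) hlt
      have hmin : i < min (i * 2) (e - b) ∧ min (i * 2) (e - b) ≤ e - b :=
        ⟨lt_min (by omega) (by omega), min_le_right _ _⟩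
      refine ihf b e (min (i * 2) (e - b)) (j + 1) (by omega) hmin.2 hn (by omega) hj1 hstep ?_
      intro j' hj'
      rcases Nat.lt_succ_iff_lt_or_eq.mp hj' with hc | hc
      · exact hmiss j' hc
      · subst hc
        rw [← hi]
        exact hhit

-- A agrees with B's loop at every sufficient fuel (totality makes this unconditional)
lemma find_k_agree : ∀ (n : Nat) (l : List Int) (b e : Int) (fuel : Nat),
    (e - b).toNat ≤ n → (e - b).toNat < fuel → find_k l b e = altFuel l b e fuel := by
  intro n
  induction n using Nat.strong_induction_on with
  | _ n ih =>
  intro l b e fuel hn hf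
  cases fuel with
  | zero => exact absurd hf (Nat.not_lt_zero _)
  | succ f =>
  unfold find_k
  rw [altFuel]
  by_cases h : b + 1 > e
  · rw [if_pos h, if_neg (by omega)]
  · rw [if_neg h, if_pos (by omega)]
    rw [inner_eq l (e - b).toNat (((e - b).toNat + 1) * ((e - b).toNat + 1)) b e 1 0
        (le_refl 1) (by omega) (le_refl _) (by ring_nf; omega) (Nat.zero_le _)
        (by rw [pow_zero]; omega) (fun j' hj' => absurd hj' (Nat.not_lt_zero j'))]
    cases hg : gallop l b (e - b) (PySem.List.pyGetD l b 0) with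
    | none => rfl
    | some hit =>
      simp only
      by_cases hone : hit = 1
      · rw [if_pos hone, if_pos hone]
      · rw [if_neg hone, if_neg hone]
        have hb := gallop_le (l := l) (b := b) (ref := PySem.List.pyGetD l b 0) (by omega) hg
        have hd : PySem.Int.floordiv hit 2 = hit / 2 :=
          PySem.Int.floordiv_eq_ediv_of_pos (by decide)
        exact ih ((b + hit) - (b + PySem.Int.floordiv hit 2)).toNat (by rw [hd] at *; omega)
          l _ _ f (le_refl _) (by rw [hd] at *; omega)

-- ===== VERDICT (by name: the statement is the Claim_ definition above) =====
theorem find_k_spec : Claim_equal_find_k := by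
  intro l b e _ _
  unfold Spec_find_k find_k_alt
  exact find_k_agree (e - b).toNat l b e ((e - b).toNat + 1) (le_refl _) (by omega)
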